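-- pv_equiv track=rewrite | github.com/shnider42/mom_daily | app.py | people_to_phone_list
-- ===== SOURCE A (Python) =====
-- from typing import Any, Dict, List, Optional, Tuple
--
-- def normalize_phone(s: str) -> str:
--     digits = "".join(ch for ch in s if ch.isdigit())
--     if len(digits) == 10:
--         return f"{digits[0:3]}-{digits[3:6]}-{digits[6:10]}"
--     return s.strip()
--
-- def people_to_phone_list(birthdays: List[Dict[str, Any]]) -> List[Dict[str, str]]:
--     out: List[Dict[str, str]] = []
--     for b in birthdays:
--         if not isinstance(b, dict):
--             continue
--         phone = normalize_phone(str(b.get("phone", "")).strip())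
--         if not phone:
--             continue
--         label = str(b.get("name", "")).strip()
--         out.append({"phone": phone, "label": label})
--     seen = set()
--     uniq = []
--     for p in out:
--         d = "".join(ch for ch in p["phone"] if ch.isdigit())
--         if d and d not in seen:
--             seen.add(d)
--             uniq.append(p)
--     return uniq
-- ===== SOURCE B (Python) =====
-- from typing import Any, Dict, List
--
-- def people_to_phone_list(birthdays: List[Dict[str, Any]]) -> List[Dict[str, str]]:
--     # One pass: key each entry by its digit string in a dict (first occurrence wins),
--     # then the answer is the dict's values in insertion order.
--     chosen: Dict[str, Dict[str, str]] = {}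
--     for b in birthdays:
--         if not isinstance(b, dict):
--             continue
--         raw = str(b.get("phone", "")).strip()
--         digits = "".join(ch for ch in raw if ch.isdigit())
--         if digits and digits not in chosen:
--             phone = f"{digits[0:3]}-{digits[3:6]}-{digits[6:10]}" if len(digits) == 10 else raw
--             chosen[digits] = {"phone": phone, "label": str(b.get("name", "")).strip()}
--     return list(chosen.values())
-- ===== Notes on version B (the rewrite author's own statement) =====
-- stated objective: simpler
-- what changed: Replaces A's two sequential passes (build an intermediate list, then dedupe it with a seen-set and a second digit extraction) by a single pass that keys first occurrences by their digit string in an insertion-ordered dict and returns its values.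
import Mathlib
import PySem

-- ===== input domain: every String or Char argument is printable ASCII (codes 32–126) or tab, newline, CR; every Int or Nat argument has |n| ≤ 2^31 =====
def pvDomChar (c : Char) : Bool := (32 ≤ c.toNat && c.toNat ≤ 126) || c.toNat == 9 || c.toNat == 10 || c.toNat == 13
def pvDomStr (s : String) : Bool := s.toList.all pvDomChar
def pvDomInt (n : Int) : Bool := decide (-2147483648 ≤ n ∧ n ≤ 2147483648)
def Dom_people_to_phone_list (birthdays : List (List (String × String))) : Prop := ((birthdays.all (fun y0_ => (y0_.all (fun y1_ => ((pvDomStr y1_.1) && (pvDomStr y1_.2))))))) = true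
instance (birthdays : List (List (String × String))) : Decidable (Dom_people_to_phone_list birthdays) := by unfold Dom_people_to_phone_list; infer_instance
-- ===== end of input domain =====

-- B replaces A's two sequential passes (build list, then dedupe with a seen-set) by one pass
-- over the input keyed by the digit string in an insertion-ordered dict; objective: simpler.

-- ===== PORT A =====
-- "".join(ch for ch in s if ch.isdigit()), on the List Char side
def pvDigits (s : List Char) : List Char := s.filter PySem.Chars.isdigit

-- normalize_phone, on the List Char side
def pvNormalizePhone (s : List Char) : List Char :=
  let digits := pvDigits s
  if digits.length = 10 then
    PySem.List.slice digits (some 0) (some 3) ++ '-' ::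
      PySem.List.slice digits (some 3) (some 6) ++ '-' ::
      PySem.List.slice digits (some 6) (some 10)
  else PySem.Chars.strip s

-- first loop of A: build `out` (isinstance(b, dict) always holds under the type convention)
def pvLoopA1 (bs : List (List (String × String))) : List (List (String × String)) :=
  match bs with
  | [] => []
  | b :: rest =>
    let phone := pvNormalizePhone (PySem.Chars.strip ((PySem.Dict.mk b).getD "phone" "").toList)
    if phone = [] then pvLoopA1 rest
    else [("phone", String.ofList phone),
          ("label", String.ofList (PySem.Chars.strip ((PySem.Dict.mk b).getD "name" "").toList))] :: pvLoopA1 rest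

-- second loop of A: dedupe by digit string with a seen-set
def pvLoopA2 (seen : PySem.Set (List Char)) (ps : List (List (String × String))) : List (List (String × String)) :=
  match ps with
  | [] => []
  | p :: rest =>
    let d := pvDigits ((PySem.Dict.mk p).getD "phone" "").toList
    if d ≠ [] ∧ seen.contains d = false then p :: pvLoopA2 (seen.add d) rest
    else pvLoopA2 seen rest

def people_to_phone_list (birthdays : List (List (String × String))) : List (List (String × String)) :=
  pvLoopA2 (PySem.Set.ofList []) (pvLoopA1 birthdays)

-- ===== PORT B =====
-- B's single pass: first occurrence per digit string into an insertion-ordered dict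
def pvLoopB (chosen : PySem.Dict (List Char) (List (String × String)))
    (bs : List (List (String × String))) : PySem.Dict (List Char) (List (String × String)) :=
  match bs with
  | [] => chosen
  | b :: rest =>
    let raw := PySem.Chars.strip ((PySem.Dict.mk b).getD "phone" "").toList
    let digits := pvDigits raw
    if digits ≠ [] ∧ chosen.contains digits = false then
      let phone := if digits.length = 10 then
          PySem.List.slice digits (some 0) (some 3) ++ '-' ::
            PySem.List.slice digits (some 3) (some 6) ++ '-' ::
            PySem.List.slice digits (some 6) (some 10)
        else raw
      pvLoopB (chosen.insert digits
        [("phone", String.ofList phone),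
         ("label", String.ofList (PySem.Chars.strip ((PySem.Dict.mk b).getD "name" "").toList))]) rest
    else pvLoopB chosen rest

def people_to_phone_list_alt (birthdays : List (List (String × String))) : List (List (String × String)) :=
  (pvLoopB (PySem.Dict.mk []) birthdays).values

-- ===== PRECONDITION & SPEC =====
def Spec_people_to_phone_list (birthdays : List (List (String × String))) (out : List (List (String × String))) : Prop := out = people_to_phone_list_alt birthdays
instance (birthdays : List (List (String × String))) (out : List (List (String × String))) : Decidable (Spec_people_to_phone_list birthdays out) := by unfold Spec_people_to_phone_list; infer_instance

-- ===== CLAIM (what is proved, stated in full; the proofs are below) =====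
def Claim_equal_people_to_phone_list : Prop := ∀ (birthdays : List (List (String × String))), Dom_people_to_phone_list birthdays → Spec_people_to_phone_list birthdays (people_to_phone_list birthdays)

-- ===== LEMMAS AND PROOFS =====
lemma isspace_not_isdigit (c : Char) (h : PySem.Chars.isspace c = true) :
    PySem.Chars.isdigit c = false := by
  simp only [PySem.Chars.isspace, Bool.or_eq_true, Bool.and_eq_true, decide_eq_true_eq] at h
  simp only [PySem.Chars.isdigit, Bool.and_eq_false_iff, decide_eq_false_iff_not, not_le,
    Char.le_def, UInt32.le_iff_toNat_le]
  have h0 : ('0' : Char).val.toNat = 48 := rfl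
  have h9 : ('9' : Char).val.toNat = 57 := rfl
  have hc : c.toNat = c.val.toNat := rfl
  omega

lemma filter_isdigit_dropWhile (l : List Char) :
    (l.dropWhile PySem.Chars.isspace).filter PySem.Chars.isdigit = l.filter PySem.Chars.isdigit := by
  induction l with
  | nil => rfl
  | cons a t ih =>
    by_cases ha : PySem.Chars.isspace a = true
    · simp [ha, isspace_not_isdigit a ha, ih]
    · simp [ha]

lemma filter_isdigit_strip (l : List Char) :
    (PySem.Chars.strip l).filter PySem.Chars.isdigit = l.filter PySem.Chars.isdigit := by
  show ((PySem.Chars.lstrip l).reverse.dropWhile PySem.Chars.isspace).reverse.filter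
      PySem.Chars.isdigit = _
  rw [List.filter_reverse, filter_isdigit_dropWhile, List.filter_reverse, List.reverse_reverse]
  exact filter_isdigit_dropWhile l

lemma lstrip_rstrip_lstrip (l : List Char) :
    PySem.Chars.lstrip (PySem.Chars.rstrip (PySem.Chars.lstrip l))
      = PySem.Chars.rstrip (PySem.Chars.lstrip l) := by
  have hr : PySem.Chars.rstrip (PySem.Chars.lstrip l)
      = List.rdropWhile PySem.Chars.isspace (PySem.Chars.lstrip l) := rfl
  rw [hr]
  rcases hm : List.rdropWhile PySem.Chars.isspace (PySem.Chars.lstrip l) with _ | ⟨a, t⟩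
  · rfl
  · -- a is the head of lstrip l, hence not a space
    have hpre := List.rdropWhile_prefix (l := PySem.Chars.lstrip l) (p := PySem.Chars.isspace)
    rw [hm] at hpre
    obtain ⟨s, hs⟩ := hpre
    have hhead : (PySem.Chars.lstrip l).head? = some a := by
      rw [← hs]; rfl
    have hna : ¬ PySem.Chars.isspace a = true := by
      intro hsp
      have := List.head_dropWhile_not (p := PySem.Chars.isspace) (l := l)
      rcases hl : PySem.Chars.lstrip l with _ | ⟨b, u⟩
      · rw [hl] at hhead; simp at hhead
      · rw [hl] at hhead
        simp only [List.head?_cons, Option.some.injEq] at hhead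
        have hne : List.dropWhile PySem.Chars.isspace l ≠ [] := by
          show PySem.Chars.lstrip l ≠ []
          rw [hl]; simp
        have := List.head_dropWhile_not (p := PySem.Chars.isspace) (l := l) hne
        have hb : (List.dropWhile PySem.Chars.isspace l).head hne = b := by
          show (PySem.Chars.lstrip l).head _ = b
          simp [hl]
        rw [hb] at this
        rw [hhead] at this
        rw [this] at hsp
        exact Bool.false_ne_true hsp
    show List.dropWhile PySem.Chars.isspace (a :: t) = a :: t
    simp [hna]

lemma strip_idem (l : List Char) :
    PySem.Chars.strip (PySem.Chars.strip l) = PySem.Chars.strip l := by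
  show PySem.Chars.rstrip (PySem.Chars.lstrip (PySem.Chars.rstrip (PySem.Chars.lstrip l))) = _
  rw [lstrip_rstrip_lstrip]
  show List.rdropWhile PySem.Chars.isspace (List.rdropWhile PySem.Chars.isspace
    (PySem.Chars.lstrip l)) = _
  rw [List.rdropWhile_idempotent]
  rfl

lemma slice03 (d : List Char) (h : d.length = 10) :
    PySem.List.slice d (some 0) (some 3) = d.take 3 := by
  simp [PySem.List.slice, PySem.List.clampIdx, h]

lemma slice36 (d : List Char) (h : d.length = 10) :
    PySem.List.slice d (some 3) (some 6) = (d.drop 3).take 3 := by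
  simp [PySem.List.slice, PySem.List.clampIdx, h]

lemma slice610 (d : List Char) (h : d.length = 10) :
    PySem.List.slice d (some 6) (some 10) = d.drop 6 := by
  simp [PySem.List.slice, PySem.List.clampIdx, h]

lemma filter_isdigit_of_all (l : List Char) (h : ∀ x ∈ l, PySem.Chars.isdigit x = true) :
    l.filter PySem.Chars.isdigit = l :=
  List.filter_eq_self.mpr h

lemma digits_normalize (s : List Char) :
    pvDigits (pvNormalizePhone s) = pvDigits s := by
  unfold pvNormalizePhone
  by_cases hlen : (pvDigits s).length = 10
  · rw [if_pos hlen]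
    set d := pvDigits s with hd
    have hall : ∀ x ∈ d, PySem.Chars.isdigit x = true := by
      intro x hx; exact List.of_mem_filter (by rw [hd] at hx; exact hx)
    show List.filter PySem.Chars.isdigit _ = d
    rw [slice03 d hlen, slice36 d hlen, slice610 d hlen]
    simp only [List.filter_append, List.filter_cons]
    have hdash : PySem.Chars.isdigit '-' = false := by decide
    simp only [hdash, Bool.false_eq_true, if_false]
    rw [filter_isdigit_of_all _ (fun x hx => hall x (List.mem_of_mem_take hx)),
      filter_isdigit_of_all _ (fun x hx => hall x (List.mem_of_mem_drop (List.mem_of_mem_take hx))),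
      filter_isdigit_of_all _ (fun x hx => hall x (List.mem_of_mem_drop hx))]
    have h64 : d.drop 6 = (d.drop 3).drop 3 := by rw [List.drop_drop]
    rw [h64, List.append_assoc, List.take_append_drop, List.take_append_drop]
  · rw [if_neg hlen]
    exact filter_isdigit_strip s

lemma values_insert_fresh {ν : Type} (d : PySem.Dict (List Char) ν) (k : List Char) (v : ν)
    (h : d.contains k = false) : (d.insert k v).values = d.values ++ [v] := by
  simp [PySem.Dict.insert, h, PySem.Dict.values]

lemma set_add_contains (seen : PySem.Set (List Char)) (k x : List Char) :
    (seen.add k).contains x = (seen.contains x || x == k) := by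
  by_cases h : seen.contains k = true
  · simp only [PySem.Set.add, if_pos h]
    by_cases hx : x = k
    · subst hx; simp_all
    · simp [hx]
  · simp only [PySem.Set.add, if_neg h]
    by_cases hx : x = k
    · subst hx; simp_all
    · simp [hx]

-- lookup of "phone" in an entry dict
lemma entry_phone (p l : List Char) :
    ((PySem.Dict.mk [("phone", String.ofList p), ("label", String.ofList l)]).getD
      "phone" "").toList = p := by
  simp [PySem.Dict.getD, PySem.Dict.get?]

-- B's inline phone expression is A's normalize_phone of the (already stripped) raw string
lemma normalize_strip (x : List Char) :
    (if (pvDigits (PySem.Chars.strip x)).length = 10 then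
       PySem.List.slice (pvDigits (PySem.Chars.strip x)) (some 0) (some 3) ++ '-' ::
         PySem.List.slice (pvDigits (PySem.Chars.strip x)) (some 3) (some 6) ++ '-' ::
         PySem.List.slice (pvDigits (PySem.Chars.strip x)) (some 6) (some 10)
     else PySem.Chars.strip x) = pvNormalizePhone (PySem.Chars.strip x) := by
  simp only [pvNormalizePhone, pvDigits]
  split_ifs with hlen
  · rfl
  · exact (strip_idem x).symm

-- main loop correspondence
lemma loop_corr (bs : List (List (String × String))) (seen : PySem.Set (List Char))
    (chosen : PySem.Dict (List Char) (List (String × String)))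
    (hinv : ∀ d, seen.contains d = chosen.contains d) :
    chosen.values ++ pvLoopA2 seen (pvLoopA1 bs) = (pvLoopB chosen bs).values := by
  induction bs generalizing seen chosen with
  | nil => simp [pvLoopA1, pvLoopA2, pvLoopB]
  | cons b rest ih =>
    simp only [pvLoopA1, pvLoopB, normalize_strip]
    split_ifs with hph hB hB
    · -- A drops the empty phone; B's digit test cannot fire
      exact absurd (by
        have := digits_normalize (PySem.Chars.strip ((PySem.Dict.mk b).getD "phone" "").toList)
        rw [hph] at this
        exact this.symm) hB.1
    · exact ih seen chosen hinv
    · -- both keep the entry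
      rw [pvLoopA2]
      simp only [entry_phone, digits_normalize]
      have hseen : seen.contains
          (pvDigits (PySem.Chars.strip ((PySem.Dict.mk b).getD "phone" "").toList)) = false := by
        rw [hinv]; exact hB.2
      rw [if_pos ⟨hB.1, hseen⟩]
      rw [← ih (seen.add (pvDigits (PySem.Chars.strip ((PySem.Dict.mk b).getD "phone" "").toList)))
            (chosen.insert (pvDigits (PySem.Chars.strip ((PySem.Dict.mk b).getD "phone" "").toList)) _)
            (by
              intro d
              rw [set_add_contains, PySem.Dict.contains_insert, hinv d, Bool.or_comm])]
      rw [values_insert_fresh _ _ _ hB.2]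
      simp
    · -- B skips: the entry's digits are empty or already seen, so A's dedupe drops it too
      rw [pvLoopA2]
      simp only [entry_phone, digits_normalize]
      rw [if_neg (by
        intro ⟨hne, hfresh⟩
        rw [hinv] at hfresh
        exact hB ⟨hne, hfresh⟩)]
      exact ih seen chosen hinv

-- ===== VERDICT (by name: the statement is the Claim_ definition above) =====
theorem people_to_phone_list_spec : Claim_equal_people_to_phone_list := by
  intro bs _
  unfold Spec_people_to_phone_list people_to_phone_list people_to_phone_list_alt
  have h := loop_corr bs (PySem.Set.ofList []) (PySem.Dict.mk []) (by intro d; rfl)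
  simpa [PySem.Dict.values] using h
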